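-- pv_equiv track=rewrite | github.com/Shloimy15e/clean-yiddish-transcripts | processors/brackets_inline.py | is_full_paragraph_bracket
-- ===== SOURCE A (Python) =====
-- def is_full_paragraph_bracket(para_text: str) -> bool:
--     """
--     Check if the paragraph is entirely wrapped in a single pair of brackets.
--
--     Returns True for paragraphs like:
--         "[This entire paragraph is in brackets]"
--
--     Returns False for paragraphs like:
--         "Some text [with a note] in the middle"
--         "[First bracket] and [second bracket]"
--     """
--     stripped = para_text.strip()
--     if not stripped.startswith('[') or not stripped.endswith(']'):
--         return False
--
--     # Check if this is a single bracket pair wrapping the whole paragraph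
--     # by counting bracket balance
--     depth = 0
--     for i, char in enumerate(stripped):
--         if char == '[':
--             depth += 1
--         elif char == ']':
--             depth -= 1
--             # If we reach depth 0 before the end, there are multiple bracket pairs
--             if depth == 0 and i < len(stripped) - 1:
--                 return False
--
--     return depth == 0
-- ===== SOURCE B (Python) =====
-- def is_full_paragraph_bracket(para_text: str) -> bool:
--     """Match bracket pairs with a stack of open-bracket positions: the paragraph is
--     fully wrapped iff the last matched pair is (0, len-1)."""
--     s = para_text.strip()
--     stack = []
--     wraps = False
--     for i, c in enumerate(s):
--         if c == '[':
--             stack.append(i)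
--         elif c == ']' and stack:
--             wraps = stack.pop() == 0 and i == len(s) - 1
--     return wraps
-- ===== Notes on version B (the rewrite author's own statement) =====
-- stated objective: alternative
-- what changed: Replaces A's depth counter with startswith/endswith guards and an early-exit indexed scan by a guard-free pair matcher: a stack of open-bracket positions matches each ']' to its '[', and the paragraph is wrapped iff the last matched pair is (0, len-1).
import Mathlib
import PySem

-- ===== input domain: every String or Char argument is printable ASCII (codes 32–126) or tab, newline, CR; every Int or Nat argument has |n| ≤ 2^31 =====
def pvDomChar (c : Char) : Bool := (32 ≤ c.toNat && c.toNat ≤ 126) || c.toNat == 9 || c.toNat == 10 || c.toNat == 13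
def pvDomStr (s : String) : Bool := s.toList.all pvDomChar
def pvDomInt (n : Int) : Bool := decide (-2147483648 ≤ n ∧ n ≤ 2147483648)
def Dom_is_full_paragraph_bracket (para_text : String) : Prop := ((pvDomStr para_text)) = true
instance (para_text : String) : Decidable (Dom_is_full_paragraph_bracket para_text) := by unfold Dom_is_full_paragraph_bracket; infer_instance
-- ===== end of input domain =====

-- B drops A's depth counter, its startswith/endswith guards and its early exit:
-- it matches bracket pairs with a stack of open-bracket positions and returns
-- whether the last matched pair is (0, len-1) (alternative algorithm, same cost).

-- ===== PORT A =====
-- A's for-loop over enumerate(stripped) with early return False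
def pvLoopA (len : Int) : List Char → Nat → Int → Bool
  | [], _, depth => depth == 0
  | c :: rest, i, depth =>
    if c = '[' then pvLoopA len rest (i + 1) (depth + 1)
    else if c = ']' then
      let d := depth - 1
      if d == 0 && decide ((i : Int) < len - 1) then false
      else pvLoopA len rest (i + 1) d
    else pvLoopA len rest (i + 1) depth

def is_full_paragraph_bracket (para_text : String) : Bool :=
  let stripped := PySem.Str.strip para_text
  if !(PySem.Str.startswith stripped "[") || !(PySem.Str.endswith stripped "]") then false
  else pvLoopA (PySem.Str.len stripped) stripped.toList 0 0

-- ===== PORT B =====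
-- one iteration of B's for-loop; the Python stack (append/pop at the right end)
-- is the Lean list with its TOP AT THE HEAD (push = cons, stack.pop() = head)
def pvStepB (n : Int) (st : List Int × Bool) (ic : Int × Char) : List Int × Bool :=
  if ic.2 = '[' then (ic.1 :: st.1, st.2)
  else if ic.2 = ']' then
    match st.1 with
    | [] => st                                   -- 'and stack' fails: no pop
    | top :: rest => (rest, top == 0 && ic.1 == n - 1)
  else st

def is_full_paragraph_bracket_alt (para_text : String) : Bool :=
  let s := (PySem.Str.strip para_text).toList
  ((PySem.List.enumerate s 0).foldl (pvStepB (s.length : Int)) ([], false)).2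

-- ===== PRECONDITION & SPEC =====
def Spec_is_full_paragraph_bracket (para_text : String) (out : Bool) : Prop := out = is_full_paragraph_bracket_alt para_text
instance (para_text : String) (out : Bool) : Decidable (Spec_is_full_paragraph_bracket para_text out) := by unfold Spec_is_full_paragraph_bracket; infer_instance

-- ===== CLAIM (what is proved, stated in full; the proofs are below) =====
def Claim_equal_is_full_paragraph_bracket : Prop := ∀ (para_text : String), Dom_is_full_paragraph_bracket para_text → Spec_is_full_paragraph_bracket para_text (is_full_paragraph_bracket para_text)

-- ===== LEMMAS AND PROOFS =====

-- (c == '[') - (c == ']') : the depth change of one character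
def pvDelta (c : Char) : Int := (if c = '[' then 1 else 0) - (if c = ']' then 1 else 0)

-- reference recursion: balance stays ≥ 1 strictly before the end, ends at 0
def pvChk : List Char → Int → Bool
  | [], d => d == 0
  | c :: rest, d =>
    if rest.isEmpty then (d + pvDelta c) == 0
    else (decide (1 ≤ d + pvDelta c)) && pvChk rest (d + pvDelta c)

lemma pvDelta_lb : pvDelta '[' = 1 := by decide
lemma pvDelta_rb : pvDelta ']' = -1 := by decide
lemma pvDelta_other (c : Char) (h1 : c ≠ '[') (h2 : c ≠ ']') : pvDelta c = 0 := by
  simp [pvDelta, h1, h2]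

lemma pvLoopA_eq_chk (l : List Char) : ∀ (len : Int) (i : Nat) (d : Int),
    (i : Int) + l.length = len → 1 ≤ d → pvLoopA len l i d = pvChk l d := by
  induction l with
  | nil => intro len i d _ _; simp [pvLoopA, pvChk]
  | cons c rest ih =>
    intro len i d hlen hd
    simp only [List.length_cons] at hlen
    have hlen' : (i : Int) + rest.length + 1 = len := by push_cast at hlen ⊢; omega
    by_cases hc : c = '['
    · subst hc
      have hA : pvLoopA len ('[' :: rest) i d = pvLoopA len rest (i + 1) (d + 1) := by
        rw [pvLoopA]; simp
      cases rest with
      | nil =>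
        rw [hA, pvLoopA, pvChk]
        simp [pvDelta_lb]
      | cons c' r =>
        rw [hA, pvChk]
        rw [ih len (i + 1) (d + 1) (by simp only [List.length_cons] at hlen' ⊢; push_cast at hlen' ⊢; omega) (by omega)]
        simp only [List.isEmpty_cons, Bool.false_eq_true, if_false, pvDelta_lb]
        rw [decide_eq_true (by omega : (1 : Int) ≤ d + 1)]
        simp
    · by_cases hc2 : c = ']'
      · subst hc2
        have hA : pvLoopA len (']' :: rest) i d
            = if (d - 1 == 0 && decide ((i : Int) < len - 1)) then false
              else pvLoopA len rest (i + 1) (d - 1) := by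
          rw [pvLoopA]; simp
        cases rest with
        | nil =>
          have hni : ¬ ((i : Int) < len - 1) := by simp only [List.length_nil] at hlen'; omega
          rw [hA, if_neg (by simp [hni]), pvLoopA, pvChk]
          simp [pvDelta_rb, sub_eq_add_neg]
        | cons c' r =>
          have hi : ((i : Int) < len - 1) := by simp only [List.length_cons] at hlen'; push_cast at hlen'; omega
          have hC : pvChk (']' :: c' :: r) d
              = (decide (1 ≤ d - 1) && pvChk (c' :: r) (d - 1)) := by
            rw [pvChk]
            simp only [List.isEmpty_cons, Bool.false_eq_true, if_false, pvDelta_rb]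
            rw [show d + -1 = d - 1 by ring]
          rw [hA, hC]
          by_cases hz : d - 1 = 0
          · rw [if_pos (by simp [hz, hi]), hz]
            simp
          · have hge : 1 ≤ d - 1 := by omega
            rw [if_neg (by simp [hi]; omega)]
            rw [ih len (i + 1) (d - 1) (by simp only [List.length_cons] at hlen' ⊢; push_cast at hlen' ⊢; omega) hge, decide_eq_true hge]
            simp
      · have hδ := pvDelta_other c hc hc2
        have hA : pvLoopA len (c :: rest) i d = pvLoopA len rest (i + 1) d := by
          rw [pvLoopA]; simp [hc, hc2]
        cases rest with
        | nil =>
          rw [hA, pvLoopA, pvChk]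
          simp [hδ]
        | cons c' r =>
          rw [hA, pvChk]
          rw [ih len (i + 1) d (by simp only [List.length_cons] at hlen' ⊢; push_cast at hlen' ⊢; omega) hd]
          simp only [List.isEmpty_cons, Bool.false_eq_true, if_false, hδ, add_zero]
          rw [decide_eq_true hd]
          simp

-- if pvChk holds from depth ≥ 1, the last character is ']'
lemma pvChk_last (l : List Char) : ∀ (c : Char) (d : Int), 1 ≤ d →
    pvChk (l ++ [c]) d = true → c = ']' := by
  induction l with
  | nil =>
    intro c d hd h
    simp [pvChk] at h
    by_contra hc
    by_cases h1 : c = '[' <;> simp [pvDelta, h1, hc] at h <;> omega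
  | cons c0 rest ih =>
    intro c d hd h
    rw [List.cons_append, pvChk] at h
    have : (rest ++ [c]).isEmpty = false := by simp
    rw [this] at h
    simp only [Bool.false_eq_true, if_false, Bool.and_eq_true, decide_eq_true_eq] at h
    exact ih c (d + pvDelta c0) h.1 h.2

-- once wraps is false and position 0 can no longer be popped, B stays false
lemma pvFoldB_dead (n : Int) (l : List Char) : ∀ (i : Int) (st : List Int),
    (∀ x ∈ st, x ≠ 0) → 1 ≤ i →
    ((PySem.List.enumerate l i).foldl (pvStepB n) (st, false)).2 = false := by
  induction l with
  | nil => intro i st _ _; simp [PySem.List.enumerate_nil]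
  | cons c rest ih =>
    intro i st hst hi
    rw [PySem.List.enumerate_cons, List.foldl_cons]
    by_cases hc : c = '['
    · rw [show pvStepB n (st, false) (i, c) = (i :: st, false) by simp [pvStepB, hc]]
      exact ih (i + 1) (i :: st)
        (by intro x hx
            rcases List.mem_cons.mp hx with rfl | hx
            · omega
            · exact hst x hx) (by omega)
    · by_cases hc2 : c = ']'
      · cases st with
        | nil =>
          rw [show pvStepB n (([] : List Int), false) (i, c) = ([], false) by
            simp [pvStepB, hc, hc2]]
          exact ih (i + 1) [] (by simp) (by omega)
        | cons top r =>
          have htop : top ≠ 0 := hst top (by simp)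
          rw [show pvStepB n (top :: r, false) (i, c) = (r, false) by
            simp [pvStepB, hc, hc2, htop]]
          exact ih (i + 1) r (fun x hx => hst x (by simp [hx])) (by omega)
      · rw [show pvStepB n (st, false) (i, c) = (st, false) by simp [pvStepB, hc, hc2]]
        exact ih (i + 1) st hst (by omega)

-- the invariant run: B's fold from stack t ++ [0] equals A's loop at depth |t| + 1
lemma pvFoldB_eq_loopA (n : Int) (l : List Char) : ∀ (i : Nat) (t : List Int),
    (∀ x ∈ t, x ≠ 0) → 1 ≤ i → (i : Int) + l.length = n →
    ((PySem.List.enumerate l i).foldl (pvStepB n) (t ++ [0], false)).2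
      = pvLoopA n l i ((t.length : Int) + 1) := by
  induction l with
  | nil =>
    intro i t _ _ _
    rw [PySem.List.enumerate_nil, List.foldl_nil, pvLoopA]
    have h0 : (((t.length : Int) + 1) == 0) = false := by
      rw [beq_eq_false_iff_ne]; omega
    rw [h0]
  | cons c rest ih =>
    intro i t ht hi hn
    simp only [List.length_cons] at hn
    have hn' : (i : Int) + rest.length + 1 = n := by push_cast at hn ⊢; omega
    rw [PySem.List.enumerate_cons, List.foldl_cons]
    by_cases hc : c = '['
    · rw [show pvStepB n (t ++ [0], false) ((i : Int), c) = ((i : Int) :: t ++ [0], false) by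
        simp [pvStepB, hc]]
      rw [show ((i : Int) :: t ++ [0] : List Int) = ((i : Int) :: t) ++ [0] by simp]
      rw [show ((i : Int) + 1) = (((i + 1 : Nat)) : Int) by push_cast; ring]
      rw [ih (i + 1) ((i : Int) :: t)
        (by intro x hx
            rcases List.mem_cons.mp hx with rfl | hx
            · intro h; omega
            · exact ht x hx)
        (by omega) (by push_cast; omega)]
      rw [show pvLoopA n (c :: rest) i ((t.length : Int) + 1)
            = pvLoopA n rest (i + 1) ((t.length : Int) + 1 + 1) by rw [pvLoopA]; simp [hc]]
      norm_num
    · by_cases hc2 : c = ']'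
      · cases t with
        | nil =>
          rw [show pvStepB n (([] : List Int) ++ [0], false) ((i : Int), c)
                = ([], ((0 : Int) == 0 && (i : Int) == n - 1)) by simp [pvStepB, hc, hc2]]
          have hA : pvLoopA n (c :: rest) i ((([] : List Int).length : Int) + 1)
              = if ((0 : Int) == 0 && decide ((i : Int) < n - 1)) then false
                else pvLoopA n rest (i + 1) 0 := by
            rw [hc2, pvLoopA]
            rw [if_neg (by decide), if_pos rfl]
            norm_num
          by_cases hend : (i : Int) = n - 1
          · have hrest : rest = [] := by
              have := hn'; rw [hend] at this
              have : (rest.length : Int) = 0 := by omega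
              exact List.length_eq_zero_iff.mp (by exact_mod_cast this)
            subst hrest
            rw [PySem.List.enumerate_nil, List.foldl_nil, hA,
              if_neg (by simp; omega), pvLoopA]
            simp [hend]
          · have hlt : (i : Int) < n - 1 := by
              have : rest.length ≠ 0 := by
                intro h0; rw [h0] at hn'; push_cast at hn'; omega
              omega
            rw [show ((0 : Int) == 0 && (i : Int) == n - 1) = false by simp [hend]]
            rw [show ((i : Int) + 1) = (((i : Nat) : Int) + 1) by ring]
            rw [pvFoldB_dead n rest ((i : Int) + 1) [] (by simp) (by omega)]
            rw [hA, if_pos (by simp [hlt])]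
        | cons x t' =>
          have hx : x ≠ 0 := ht x (by simp)
          rw [show pvStepB n ((x :: t') ++ [0], false) ((i : Int), c) = (t' ++ [0], false) by
            simp [pvStepB, hc, hc2, hx]]
          rw [show ((i : Int) + 1) = (((i + 1 : Nat)) : Int) by push_cast; ring]
          rw [ih (i + 1) t' (fun y hy => ht y (by simp [hy])) (by omega) (by push_cast; omega)]
          have hA : pvLoopA n (c :: rest) i (((x :: t').length : Int) + 1)
              = if (((x :: t').length : Int) + 1 - 1 == 0 && decide ((i : Int) < n - 1)) then false
                else pvLoopA n rest (i + 1) (((x :: t').length : Int) + 1 - 1) := by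
            rw [hc2, pvLoopA]; simp
          rw [hA, if_neg (by simp; omega)]
          congr 1
          simp only [List.length_cons]; push_cast; ring
      · rw [show pvStepB n (t ++ [0], false) ((i : Int), c) = (t ++ [0], false) by
          simp [pvStepB, hc, hc2]]
        rw [show ((i : Int) + 1) = (((i + 1 : Nat)) : Int) by push_cast; ring]
        rw [ih (i + 1) t ht (by omega) (by push_cast; omega)]
        rw [show pvLoopA n (c :: rest) i ((t.length : Int) + 1)
              = pvLoopA n rest (i + 1) ((t.length : Int) + 1) by rw [pvLoopA]; simp [hc, hc2]]

-- ===== VERDICT (by name: the statement is the Claim_ definition above) =====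
theorem is_full_paragraph_bracket_spec : Claim_equal_is_full_paragraph_bracket := by
  intro para_text _
  unfold Spec_is_full_paragraph_bracket is_full_paragraph_bracket is_full_paragraph_bracket_alt
  simp only []
  set s := PySem.Str.strip para_text with hs
  have hstart : PySem.Str.startswith s "[" = PySem.Chars.startswith s.toList ['['] := by
    simp [PySem.Str.startswith_eq]
  have hend : PySem.Str.endswith s "]" = PySem.Chars.endswith s.toList [']'] := by
    simp [PySem.Str.endswith_eq]
  have hlen : PySem.Str.len s = (s.toList.length : Int) := by simp [PySem.Str.len_eq]
  rw [hstart, hend, hlen]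
  cases hl : s.toList with
  | nil => simp [PySem.Chars.startswith_iff, PySem.List.enumerate_nil]
  | cons c tail =>
    by_cases hc : c = '['
    · subst hc
      -- B's first step pushes index 0: stack becomes [] ++ [0]
      have hB : ((PySem.List.enumerate ('[' :: tail) 0).foldl
            (pvStepB (('[' :: tail).length : Int)) ([], false)).2
          = pvLoopA (('[' :: tail).length : Int) tail 1 1 := by
        rw [PySem.List.enumerate_cons, List.foldl_cons]
        rw [show pvStepB (('[' :: tail).length : Int) ([], false) ((0 : Int), '[')
              = (([] : List Int) ++ [0], false) by simp [pvStepB]]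
        rw [show ((0 : Int) + 1) = (((1 : Nat)) : Int) by norm_num]
        rw [pvFoldB_eq_loopA (('[' :: tail).length : Int) tail 1 []
          (by simp) (by omega) (by simp; push_cast; omega)]
        norm_num
      rw [hB]
      have h1 : PySem.Chars.startswith ('[' :: tail) ['['] = true := by
        rw [PySem.Chars.startswith_iff]; exact ⟨tail, rfl⟩
      rw [h1]
      cases h2 : PySem.Chars.endswith ('[' :: tail) [']'] with
      | true =>
        -- both guards hold: A's loop takes its '[' step, then equals B
        simp only [Bool.not_true, Bool.false_or, Bool.not_false, Bool.false_eq_true, if_false]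
        rw [show pvLoopA (('[' :: tail).length : Int) ('[' :: tail) 0 0
              = pvLoopA (('[' :: tail).length : Int) tail 1 1 by rw [pvLoopA]; simp]
      | false =>
        -- endswith fails: A is false; B's run would need a final ']', contradiction
        simp only [Bool.not_false, Bool.true_or, if_true]
        cases tail with
        | nil => simp [pvLoopA]
        | cons c' r =>
          rw [pvLoopA_eq_chk (c' :: r) (('[' :: c' :: r).length : Int) 1 1
            (by simp; push_cast; omega) (by omega)]
          cases hb : pvChk (c' :: r) 1 with
          | false => rfl
          | true =>
            exfalso
            have hsplit : (c' :: r) = (c' :: r).dropLast ++ [(c' :: r).getLast (by simp)] :=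
              (List.dropLast_append_getLast (by simp)).symm
            rw [hsplit] at hb
            have hlast := pvChk_last ((c' :: r).dropLast) ((c' :: r).getLast (by simp)) 1
              (by omega) hb
            have : PySem.Chars.endswith ('[' :: c' :: r) [']'] = true := by
              rw [PySem.Chars.endswith_iff]
              exact ⟨'[' :: (c' :: r).dropLast, by rw [List.cons_append, ← hlast, ← hsplit]⟩
            rw [this] at h2
            simp at h2
    · -- first character is not '[': A's guard fails, and B can never pop index 0
      have h1 : PySem.Chars.startswith (c :: tail) ['['] = false := by
        cases h : PySem.Chars.startswith (c :: tail) ['['] with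
        | false => rfl
        | true =>
          exfalso
          rcases (PySem.Chars.startswith_iff (s := c :: tail) (p := ['['])).mp h with ⟨t, ht⟩
          exact hc (by cases ht; rfl)
      rw [h1]
      simp only [Bool.not_false, Bool.true_or, if_true]
      have hB : ((PySem.List.enumerate (c :: tail) 0).foldl
            (pvStepB ((c :: tail).length : Int)) ([], false)).2 = false := by
        rw [PySem.List.enumerate_cons, List.foldl_cons]
        by_cases hc2 : c = ']'
        · rw [show pvStepB ((c :: tail).length : Int) ([], false) ((0 : Int), c)
                = ([], false) by simp [pvStepB, hc, hc2]]
          exact pvFoldB_dead _ tail 1 [] (by simp) (by omega)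
        · rw [show pvStepB ((c :: tail).length : Int) ([], false) ((0 : Int), c)
                = ([], false) by simp [pvStepB, hc, hc2]]
          exact pvFoldB_dead _ tail 1 [] (by simp) (by omega)
      rw [hB]
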